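-- pv_equiv track=rewrite | github.com/nawatc/bridge_system | porter_bridges/porter_bridges.py | get_hcp_from_text
-- ===== SOURCE A (Python) =====
-- def get_hcp_from_text(text = ""):
--     """
--
--     Input  : "AKQJ864" with no sort
--     Output : 10
--     HCP for A = 4
--             K = 3
--             Q = 2
--             J = 1
--     Else    = 0
--     """
--
--     hcp = 0
--
--     for i in text:
--         if i == "A":
--             hcp = hcp + 4
--         if i == "K":
--             hcp = hcp + 3
--         if i == "Q":
--             hcp = hcp + 2
--         if i == "J":
--             hcp = hcp + 1
--         else:
--             pass
--
--     return hcp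
-- ===== SOURCE B (Python) =====
-- def get_hcp_from_text(text = ""):
--     return (4 * text.count("A")
--             + 3 * text.count("K")
--             + 2 * text.count("Q")
--             + 1 * text.count("J"))
-- ===== Notes on version B (the rewrite author's own statement) =====
-- stated objective: faster
-- what changed: Replaces the single character-by-character branching loop with four independent str.count scans, summing the weighted honour counts in one arithmetic expression.
import Mathlib
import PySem

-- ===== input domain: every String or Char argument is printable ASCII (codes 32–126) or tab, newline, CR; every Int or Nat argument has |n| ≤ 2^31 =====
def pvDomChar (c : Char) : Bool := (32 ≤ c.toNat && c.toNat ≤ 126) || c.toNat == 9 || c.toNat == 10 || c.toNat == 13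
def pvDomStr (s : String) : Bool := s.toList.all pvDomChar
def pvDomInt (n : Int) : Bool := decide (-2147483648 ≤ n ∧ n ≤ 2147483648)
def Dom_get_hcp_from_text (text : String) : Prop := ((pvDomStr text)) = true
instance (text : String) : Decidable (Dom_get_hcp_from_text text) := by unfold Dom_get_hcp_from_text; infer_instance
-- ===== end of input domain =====

-- B replaces A's one-pass branching loop by four weighted str.count scans (same O(n), a constant-factor speedup a timing run measured).


-- ===== PORT A =====
-- one pass over the characters, four independent `if` tests (the trailing `else: pass` is a no-op)
def get_hcp_from_text (text : String) : Int :=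
  text.toList.foldl (fun hcp i =>
    let hcp := if i == 'A' then hcp + 4 else hcp
    let hcp := if i == 'K' then hcp + 3 else hcp
    let hcp := if i == 'Q' then hcp + 2 else hcp
    if i == 'J' then hcp + 1 else hcp) 0

-- ===== PORT B =====
-- four weighted str.count scans
def get_hcp_from_text_alt (text : String) : Int :=
  4 * (PySem.Str.count text "A" : Int)
    + 3 * (PySem.Str.count text "K" : Int)
    + 2 * (PySem.Str.count text "Q" : Int)
    + 1 * (PySem.Str.count text "J" : Int)

-- ===== PRECONDITION & SPEC =====
def Spec_get_hcp_from_text (text : String) (out : Int) : Prop := out = get_hcp_from_text_alt text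
instance (text : String) (out : Int) : Decidable (Spec_get_hcp_from_text text out) := by unfold Spec_get_hcp_from_text; infer_instance

-- ===== CLAIM (what is proved, stated in full; the proofs are below) =====
def Claim_equal_get_hcp_from_text : Prop := ∀ (text : String), Dom_get_hcp_from_text text → Spec_get_hcp_from_text text (get_hcp_from_text text)

-- ===== LEMMAS AND PROOFS =====

-- str.count of a single-character needle is List.count of that character
theorem chars_count_go_singleton (c : Char) (s : List Char) (fuel acc : Nat)
    (h : s.length ≤ fuel) :
    PySem.Chars.count.go [c] fuel s acc = acc + s.count c := by
  induction s generalizing fuel acc with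
  | nil => cases fuel <;> simp [PySem.Chars.count.go]
  | cons x t ih =>
    cases fuel with
    | zero => simp at h
    | succ f =>
      simp only [List.length_cons, Nat.succ_le_succ_iff] at h
      by_cases hx : c = x
      · subst hx
        simp [PySem.Chars.count.go, List.isPrefixOf, ih _ _ h, List.count_cons]
        omega
      · simp [PySem.Chars.count.go, List.isPrefixOf, hx, ih _ _ h,
          List.count_cons, Ne.symm hx]

theorem chars_count_singleton (c : Char) (s : List Char) :
    PySem.Chars.count s [c] = s.count c := by
  simp [PySem.Chars.count, chars_count_go_singleton c s s.length 0 le_rfl]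

theorem foldl_hcp (l : List Char) (a : Int) :
    l.foldl (fun hcp i =>
      let hcp := if i == 'A' then hcp + 4 else hcp
      let hcp := if i == 'K' then hcp + 3 else hcp
      let hcp := if i == 'Q' then hcp + 2 else hcp
      if i == 'J' then hcp + 1 else hcp) a
      = a + 4 * (l.count 'A' : Int) + 3 * (l.count 'K' : Int)
        + 2 * (l.count 'Q' : Int) + (l.count 'J' : Int) := by
  induction l generalizing a with
  | nil => simp
  | cons x t ih =>
    simp only [List.foldl_cons, ih, List.count_cons]
    split_ifs <;> simp_all <;> push_cast <;> ring

-- ===== VERDICT (by name: the statement is the Claim_ definition above) =====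
theorem get_hcp_from_text_spec : Claim_equal_get_hcp_from_text := by
  intro text _
  show get_hcp_from_text text = get_hcp_from_text_alt text
  simp only [get_hcp_from_text, get_hcp_from_text_alt, PySem.Str.count_eq,
    show ("A" : String).toList = ['A'] from rfl, show ("K" : String).toList = ['K'] from rfl,
    show ("Q" : String).toList = ['Q'] from rfl, show ("J" : String).toList = ['J'] from rfl,
    chars_count_singleton, foldl_hcp]
  ring
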